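-- pv_equiv track=rewrite | github.com/DanB53/Homework-Hawk | encryption.py | make_definition
-- ===== SOURCE A (Python) =====
-- def make_definition(seed):
--     import string
--     charset = string.ascii_letters + string.digits + " " + string.punctuation
--     definition = []
--     for i in charset:
--         pos = charset.find(i)
--         key = ""
--         counter = -1
--         for char in charset:
--             counter += 1
--             if char == i:
--                 pos = counter
--                 for j in range(5):
--                     pos += seed
--                     pos %= len(charset)
--
--                     key = key + charset[pos]
--
--                 break
--         definition.append(key)
--     return definition
-- ===== SOURCE B (Python) =====
-- def make_definition(seed):
--     import string
--     charset = string.ascii_letters + string.digits + " " + string.punctuation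
--     r = seed % len(charset)
--     rot = lambda s: s[r:] + s[:r]
--     c1 = rot(charset)
--     c2 = rot(c1)
--     c3 = rot(c2)
--     c4 = rot(c3)
--     c5 = rot(c4)
--     return ["".join(t) for t in zip(c1, c2, c3, c4, c5)]
-- ===== Notes on version B (the rewrite author's own statement) =====
-- stated objective: alternative
-- what changed: Instead of A's per-character scan (re-finding each character's position, then a stateful 5-step pos-update loop building each key), B builds five successive rotations of the whole charset by seed mod len and zips them columnwise, so each key is one row of the rotation table; correct because stepping the position by seed k times lands on the charset rotated by k*seed.
import Mathlib
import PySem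

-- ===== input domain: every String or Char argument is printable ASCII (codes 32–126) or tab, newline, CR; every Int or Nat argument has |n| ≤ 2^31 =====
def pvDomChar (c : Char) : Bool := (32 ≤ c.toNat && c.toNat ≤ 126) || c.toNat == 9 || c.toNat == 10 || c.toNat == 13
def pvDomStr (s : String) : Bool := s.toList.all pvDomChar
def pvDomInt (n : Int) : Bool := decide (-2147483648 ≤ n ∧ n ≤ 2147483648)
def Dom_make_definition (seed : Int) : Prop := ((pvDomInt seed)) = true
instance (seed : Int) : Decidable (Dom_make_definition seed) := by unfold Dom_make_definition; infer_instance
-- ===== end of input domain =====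

-- B replaces A's per-character positional scan and stateful 5-step index loop by a
-- whole-table construction: five successive rotations of the charset, zipped columnwise.
-- Objective: alternative algorithm (rotation + zip instead of per-character index arithmetic).

-- string.ascii_letters + string.digits + " " + string.punctuation
def pvCharset : String :=
  "abcdefghijklmnopqrstuvwxyzABCDEFGHIJKLMNOPQRSTUVWXYZ0123456789 !\"#$%&'()*+,-./:;<=>?@[\\]^_`{|}~"

-- ===== PORT A =====
-- the innermost 'for j in range(5): pos += seed; pos %= len(charset); key = key + charset[pos]'
def mdFive (seed : Int) (cs : List Char) (pos : Int) (key : String) : String :=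
  ((PySem.List.pyRange 0 5 1).foldl
    (fun (st : Int × String) _ =>
      let pos := st.1 + seed
      let pos := PySem.Int.mod pos (cs.length : Int)
      (pos, st.2.push (PySem.List.pyGetD cs pos ' ')))
    (pos, key)).2

-- the 'for char in charset: counter += 1; if char == i: … break' scan
def mdScan (seed : Int) (cs : List Char) (i : Char) : List Char → Int → String → String
  | [], _, key => key
  | c :: rest, counter, key =>
    let counter := counter + 1
    if c == i then mdFive seed cs counter key
    else mdScan seed cs i rest counter key

def make_definition (seed : Int) : List String :=
  let charset := pvCharset.toList
  charset.foldl
    (fun definition i =>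
      let _pos := PySem.Str.find pvCharset (String.singleton i)  -- 'pos = charset.find(i)' (overwritten before use)
      definition ++ [mdScan seed charset i charset (-1) ""])
    []

-- ===== PORT B =====
-- rot = lambda s: s[r:] + s[:r]
def mdRot (r : Int) (s : List Char) : List Char :=
  PySem.List.slice s (some r) none ++ PySem.List.slice s none (some r)

-- ["".join(t) for t in zip(c1, c2, c3, c4, c5)]  (zip stops at the shortest list)
def mdZip5 : List Char → List Char → List Char → List Char → List Char → List String
  | a :: as, b :: bs, c :: cs, d :: ds, e :: es =>
      String.ofList [a, b, c, d, e] :: mdZip5 as bs cs ds es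
  | _, _, _, _, _ => []

def make_definition_alt (seed : Int) : List String :=
  let cs := pvCharset.toList
  let r := PySem.Int.mod seed (cs.length : Int)
  let c1 := mdRot r cs
  let c2 := mdRot r c1
  let c3 := mdRot r c2
  let c4 := mdRot r c3
  let c5 := mdRot r c4
  mdZip5 c1 c2 c3 c4 c5

-- ===== PRECONDITION & SPEC =====
def Spec_make_definition (seed : Int) (out : List String) : Prop := out = make_definition_alt seed
instance (seed : Int) (out : List String) : Decidable (Spec_make_definition seed out) := by unfold Spec_make_definition; infer_instance

-- ===== CLAIM (what is proved, stated in full; the proofs are below) =====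
def Claim_equal_make_definition : Prop := ∀ (seed : Int), Dom_make_definition seed → Spec_make_definition seed (make_definition seed)

-- ===== LEMMAS AND PROOFS =====

theorem pvCharset_nodup : pvCharset.toList.Nodup := by decide

theorem pvCharset_len : pvCharset.toList.length = 95 := by decide

-- the scan finds the first occurrence: its result is mdFive at counter+1+idxOf
theorem mdScan_eq (seed : Int) (cs : List Char) (i : Char) :
    ∀ (l : List Char) (c : Int) (key : String), i ∈ l →
      mdScan seed cs i l c key = mdFive seed cs (c + 1 + l.idxOf i) key := by
  intro l
  induction l with
  | nil => intro c key h; cases h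
  | cons x rest ih =>
    intro c key h
    by_cases hx : x = i
    · subst hx
      simp [mdScan, List.idxOf_cons_self]
    · have hi : i ∈ rest := by
        rcases List.mem_cons.mp h with h' | h'
        · exact absurd h'.symm hx
        · exact h'
      rw [mdScan, if_neg (by simp [hx])]
      rw [ih (c + 1) key hi]
      rw [List.idxOf_cons_ne _ (by simpa using hx)]
      congr 1
      push_cast
      ring

-- the five-step loop computes the closed-form characters
theorem mdFive_closed (seed p : Int) :
    mdFive seed pvCharset.toList p "" =
      String.ofList [
        PySem.List.pyGetD pvCharset.toList ((p + seed) % 95) ' ',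
        PySem.List.pyGetD pvCharset.toList ((p + 2 * seed) % 95) ' ',
        PySem.List.pyGetD pvCharset.toList ((p + 3 * seed) % 95) ' ',
        PySem.List.pyGetD pvCharset.toList ((p + 4 * seed) % 95) ' ',
        PySem.List.pyGetD pvCharset.toList ((p + 5 * seed) % 95) ' '] := by
  have hpy : PySem.List.pyRange 0 5 1 = [0, 1, 2, 3, 4] := by decide
  have hmod : ∀ a : Int, PySem.Int.mod a ((pvCharset.toList.length : Nat) : Int) = a % 95 := by
    intro a
    have h : (pvCharset.toList.length : Int) = 95 := by decide
    rw [h]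
    exact PySem.Int.mod_eq_emod_of_pos (by omega)
  apply String.toList_injective
  simp only [mdFive, hpy, List.foldl_cons, List.foldl_nil, hmod,
    String.toList_push, String.toList_ofList]
  have hch : ("" : String).toList = [] := rfl
  simp only [hch, List.nil_append, List.cons_append, List.cons.injEq, and_true]
  refine ⟨trivial, ?_, ?_, ?_, ?_⟩ <;>
    exact congrArg (fun z => PySem.List.pyGetD pvCharset.toList z ' ') (by omega)

-- A as a map over the indexed characters
theorem make_definition_eq_map (seed : Int) :
    make_definition seed =
      (PySem.List.enumerate pvCharset.toList 0).map (fun pc =>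
        mdFive seed pvCharset.toList pc.1 "") := by
  rw [make_definition]
  rw [PySem.List.foldl_append_singleton_eq_map]
  rw [List.nil_append]
  conv_lhs => rw [show pvCharset.toList =
    (PySem.List.enumerate pvCharset.toList 0).map (·.2) from
      (PySem.List.map_snd_enumerate _ _).symm, List.map_map]
  apply List.map_congr_left
  intro pc hpc
  obtain ⟨k, hk, rfl⟩ := (PySem.List.mem_enumerate_iff _ _ _).mp hpc
  have hmem : pvCharset.toList[k] ∈ pvCharset.toList := List.getElem_mem hk
  simp only [Function.comp]
  simp only [PySem.List.map_snd_enumerate]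
  rw [mdScan_eq seed _ _ _ _ _ hmem]
  rw [pvCharset_nodup.idxOf_getElem k hk]
  norm_num

-- A restated over List.range
theorem make_definition_eq_range (seed : Int) :
    make_definition seed =
      (List.range 95).map (fun (p : Nat) => mdFive seed pvCharset.toList (p : Int) "") := by
  rw [make_definition_eq_map,
    PySem.List.enumerate_eq_map_pyRange pvCharset.toList ' ']
  have hlen : PySem.List.len pvCharset.toList = ((95 : Nat) : Int) := by decide
  rw [hlen, PySem.List.pyRange_zero_natCast, List.map_map, List.map_map]
  rfl

-- B's per-application rotation is List.rotate
theorem mdRot_eq_rotate (r : Int) (hr0 : 0 ≤ r) (s : List Char) (hr : r.toNat ≤ s.length) :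
    mdRot r s = s.rotate r.toNat := by
  rw [mdRot, PySem.List.slice_from s hr0, PySem.List.slice_to s hr0,
    List.rotate_eq_drop_append_take hr]

-- zip5 of equal-length lists, elementwise
theorem mdZip5_eq (n : Nat) :
    ∀ (a b c d e : List Char), a.length = n → b.length = n → c.length = n →
      d.length = n → e.length = n →
      mdZip5 a b c d e = (List.range n).map (fun p =>
        String.ofList [a.getD p ' ', b.getD p ' ', c.getD p ' ', d.getD p ' ', e.getD p ' ']) := by
  induction n with
  | zero =>
    intro a b c d e ha hb hc hd he
    rw [List.length_eq_zero_iff] at ha hb hc hd he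
    subst ha hb hc hd he
    rfl
  | succ m ih =>
    intro a b c d e ha hb hc hd he
    obtain ⟨x, as, rfl⟩ := List.exists_cons_of_length_eq_add_one ha
    obtain ⟨y, bs, rfl⟩ := List.exists_cons_of_length_eq_add_one hb
    obtain ⟨z, cs, rfl⟩ := List.exists_cons_of_length_eq_add_one hc
    obtain ⟨w, ds, rfl⟩ := List.exists_cons_of_length_eq_add_one hd
    obtain ⟨v, es, rfl⟩ := List.exists_cons_of_length_eq_add_one he
    simp only [List.length_cons, Nat.add_right_cancel_iff] at ha hb hc hd he
    rw [List.range_succ_eq_map]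
    simp only [mdZip5, List.map_cons, List.getD_cons_zero, List.map_map]
    rw [ih as bs cs ds es ha hb hc hd he]
    congr 1

-- a rotated charset read at p is the charset read at (p + shift) mod 95
theorem rot_getD (m p : Nat) (hp : p < 95) :
    (pvCharset.toList.rotate m).getD p ' ' =
      PySem.List.pyGetD pvCharset.toList (((p : Nat) + m : Nat) % 95 : Nat) ' ' := by
  have hplen : p < (pvCharset.toList.rotate m).length := by
    rw [List.length_rotate, pvCharset_len]; exact hp
  rw [List.getD_eq_getElem _ ' ' hplen, List.getElem_rotate]
  have hlt : (p + m) % 95 < 95 := Nat.mod_lt _ (by omega)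
  rw [PySem.List.pyGetD_natCast]
  rw [List.getD_eq_getElem _ ' ' (by rw [pvCharset_len]; exact hlt)]
  congr 1

-- B restated over List.range
theorem make_definition_alt_eq_range (seed : Int) :
    make_definition_alt seed =
      (List.range 95).map (fun p => String.ofList [
        PySem.List.pyGetD pvCharset.toList ((p + (seed % 95).toNat) % 95 : Nat) ' ',
        PySem.List.pyGetD pvCharset.toList ((p + ((seed % 95).toNat + (seed % 95).toNat)) % 95 : Nat) ' ',
        PySem.List.pyGetD pvCharset.toList ((p + ((seed % 95).toNat + (seed % 95).toNat + (seed % 95).toNat)) % 95 : Nat) ' ',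
        PySem.List.pyGetD pvCharset.toList ((p + ((seed % 95).toNat + (seed % 95).toNat + (seed % 95).toNat + (seed % 95).toNat)) % 95 : Nat) ' ',
        PySem.List.pyGetD pvCharset.toList ((p + ((seed % 95).toNat + (seed % 95).toNat + (seed % 95).toNat + (seed % 95).toNat + (seed % 95).toNat)) % 95 : Nat) ' ']) := by
  have hlen : ((pvCharset.toList.length : Nat) : Int) = 95 := by decide
  have hr : PySem.Int.mod seed ((pvCharset.toList.length : Nat) : Int) = seed % 95 := by
    rw [hlen]; exact PySem.Int.mod_eq_emod_of_pos (by omega)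
  have hr0 : 0 ≤ seed % 95 := Int.emod_nonneg _ (by omega)
  have hrlt : (seed % 95).toNat < 95 := by
    have := Int.emod_lt_of_pos seed (show (0:Int) < 95 by omega); omega
  unfold make_definition_alt
  simp only [hr]
  set rn := (seed % 95).toNat with hrn
  have h1 : mdRot (seed % 95) pvCharset.toList = pvCharset.toList.rotate rn := by
    apply mdRot_eq_rotate _ hr0; rw [pvCharset_len]; omega
  have hrotlen : ∀ m : Nat, ((pvCharset.toList.rotate m).length) = 95 := by
    intro m; rw [List.length_rotate, pvCharset_len]
  have h2 : ∀ m : Nat, mdRot (seed % 95) (pvCharset.toList.rotate m) =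
      pvCharset.toList.rotate (m + rn) := by
    intro m
    rw [mdRot_eq_rotate _ hr0 _ (by rw [hrotlen]; omega), List.rotate_rotate]
  rw [h1, h2, h2, h2, h2]
  rw [mdZip5_eq 95 _ _ _ _ _ (hrotlen _) (hrotlen _) (hrotlen _) (hrotlen _) (hrotlen _)]
  apply List.map_congr_left
  intro p hp
  have hp95 : p < 95 := List.mem_range.mp hp
  rw [rot_getD _ _ hp95, rot_getD _ _ hp95, rot_getD _ _ hp95, rot_getD _ _ hp95,
    rot_getD _ _ hp95]

theorem pvEqual : ∀ (seed : Int), make_definition seed = make_definition_alt seed := by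
  intro seed
  rw [make_definition_eq_range, make_definition_alt_eq_range]
  apply List.map_congr_left
  intro p hp
  have hp95 : p < 95 := List.mem_range.mp hp
  rw [mdFive_closed]
  refine congrArg String.ofList ?_
  simp only [List.cons.injEq, and_true]
  refine ⟨?_, ?_, ?_, ?_, ?_⟩ <;>
    exact congrArg (fun z => PySem.List.pyGetD pvCharset.toList z ' ') (by push_cast; omega)

-- ===== VERDICT (by name: the statement is the Claim_ definition above) =====
theorem make_definition_spec : Claim_equal_make_definition := by
  intro seed _
  unfold Spec_make_definition
  exact pvEqual seed
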